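-- pv_equiv track=rewrite | github.com/oigomezz/Retos | Hackerearth/Algorithms/Greedy-Algorithms/Bob-and-the-Tasks/solution.py | minimum_days
-- ===== SOURCE A (Python) =====
-- def minimum_days(n, k, a):
--     s = set()
--     for i in range(n):
--         s.add(a[i])
--         if len(s) > 1:
--             second_largest = sorted(s)[-2]
--             if sorted(s)[-1] - second_largest - 1 == k:
--                 return i + 1
--         last_element = sorted(s)[-1] if s else None
--         if last_element is not None and last_element - sorted(s)[-1] - 1 == k:
--             return i + 1
--     return -1
-- ===== SOURCE B (Python) =====
-- def _top2(hi, lo, x):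
--     # fold x into the (largest, second-largest) pair of distinct values
--     if hi is None:
--         return x, lo
--     if x != hi:
--         if x > hi:
--             return x, hi
--         if lo is None or x > lo:
--             return hi, x
--     return hi, lo
--
-- def minimum_days(n, k, a):
--     hi = None
--     lo = None
--     for i in range(n):
--         hi, lo = _top2(hi, lo, a[i])
--         if lo is not None and hi - lo - 1 == k:
--             return i + 1
--     return -1
-- ===== Notes on version B (the rewrite author's own statement) =====
-- stated objective: faster
-- what changed: B replaces A's per-element re-sorting of the whole distinct-value set with an incrementally maintained (largest, second-largest distinct) pair, checking the gap condition in O(1) per element.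
-- intended difference: For k = -1 and n >= 1 A's dead-code second check 'last - sorted(s)[-1] - 1 == k' (always -1 == k) fires at i = 0 and A returns 1 regardless of the data, while B returns -1 since two distinct values can never have gap -1; B's is the intended behaviour of the gap search. — e.g. on minimum_days(1, -1, [0]): A returns 1, B returns -1
-- outside the precondition, e.g. on minimum_days(3, 1, [1, 3]): A returns 2, B returns 2; on minimum_days(2, 5, [7]): A raises IndexError, B raises IndexError
import Mathlib
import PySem

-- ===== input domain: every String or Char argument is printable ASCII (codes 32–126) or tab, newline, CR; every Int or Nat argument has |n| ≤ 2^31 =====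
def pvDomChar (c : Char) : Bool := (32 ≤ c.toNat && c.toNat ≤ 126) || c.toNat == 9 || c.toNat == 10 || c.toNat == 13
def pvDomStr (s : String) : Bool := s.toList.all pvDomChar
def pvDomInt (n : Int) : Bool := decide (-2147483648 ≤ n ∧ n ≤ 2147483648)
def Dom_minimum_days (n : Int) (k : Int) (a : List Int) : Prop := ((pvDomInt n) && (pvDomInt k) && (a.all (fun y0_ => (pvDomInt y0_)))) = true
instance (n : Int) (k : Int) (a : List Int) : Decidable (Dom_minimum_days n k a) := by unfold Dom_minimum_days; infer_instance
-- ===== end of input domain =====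

-- B maintains the top-two distinct values incrementally instead of re-sorting the whole
-- distinct-value set at every element (objective: faster); for k = -1 B intentionally
-- drops A's dead-code early return (see D_minimum_days below).

-- ===== PORT A =====
def pvAgo (k : Int) (a : List Int) (s : PySem.Set Int) : List Int → Int
  | [] => -1
  | i :: is =>
    let s' := PySem.Set.add s (PySem.List.pyGetD a i 0)
    let r1 : Option Int :=
      if 1 < PySem.Set.len s' then
        let second_largest := PySem.List.pyGetD (PySem.List.sorted s' (fun x => x) false) (-2) 0
        if PySem.List.pyGetD (PySem.List.sorted s' (fun x => x) false) (-1) 0 - second_largest - 1 = k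
        then some (i + 1) else none
      else none
    match r1 with
    | some r => r
    | none =>
      let last_element : Option Int :=
        if s' ≠ [] then some (PySem.List.pyGetD (PySem.List.sorted s' (fun x => x) false) (-1) 0) else none
      match last_element with
      | some le =>
        if le - PySem.List.pyGetD (PySem.List.sorted s' (fun x => x) false) (-1) 0 - 1 = k
        then i + 1 else pvAgo k a s' is
      | none => pvAgo k a s' is

def minimum_days (n : Int) (k : Int) (a : List Int) : Int :=
  pvAgo k a PySem.Set.empty (PySem.List.pyRange 0 n 1)

-- ===== PORT B =====
def pvTop2 (hi lo : Option Int) (x : Int) : Option Int × Option Int :=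
  match hi with
  | none => (some x, lo)
  | some h =>
    if x ≠ h then
      if h < x then (some x, some h)
      else
        match lo with
        | none => (some h, some x)
        | some l => if l < x then (some h, some x) else (some h, some l)
    else (some h, lo)

def pvBgo (k : Int) (a : List Int) (hi lo : Option Int) : List Int → Int
  | [] => -1
  | i :: is =>
    let p := pvTop2 hi lo (PySem.List.pyGetD a i 0)
    match p.2 with
    | some l => if (p.1.getD 0) - l - 1 = k then i + 1 else pvBgo k a p.1 p.2 is
    | none => pvBgo k a p.1 p.2 is

def minimum_days_alt (n : Int) (k : Int) (a : List Int) : Int :=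
  pvBgo k a none none (PySem.List.pyRange 0 n 1)

-- ===== PRECONDITION & SPEC =====
-- Pre_ excludes n > len(a): there the index loop generally raises IndexError; on some such
-- inputs A still returns early before reaching an out-of-range index — those are excluded
-- too, to keep the domain closed-form (see cites in the claim).
def Pre_minimum_days (n : Int) (k : Int) (a : List Int) : Prop := n ≤ (a.length : Int)
instance (n : Int) (k : Int) (a : List Int) : Decidable (Pre_minimum_days n k a) := by
  unfold Pre_minimum_days; infer_instance

def pvWitness_minimum_days : Int × Int × List Int := (2, 1, [0, 2])

-- For k = -1 and n ≥ 1 A's dead-code second check (sorted(s)[-1] - sorted(s)[-1] - 1 == k,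
-- i.e. -1 == k) fires at i = 0 so A returns 1 regardless of the data, while B returns -1,
-- the intended answer: two distinct values never have gap -1.
def D_minimum_days (n : Int) (k : Int) (a : List Int) : Prop := k = -1 ∧ 1 ≤ n
instance (n : Int) (k : Int) (a : List Int) : Decidable (D_minimum_days n k a) := by
  unfold D_minimum_days; infer_instance

def Spec_minimum_days (n : Int) (k : Int) (a : List Int) (out : Int) : Prop :=
  ¬ D_minimum_days n k a → out = minimum_days_alt n k a
instance (n : Int) (k : Int) (a : List Int) (out : Int) : Decidable (Spec_minimum_days n k a out) := by
  unfold Spec_minimum_days; infer_instance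

def pvDiffWitness_minimum_days : Int × Int × List Int := (1, -1, [0])
def pvDiffWitnessOut_minimum_days : Int × Int := (1, -1)

-- ===== CLAIM (what is proved, stated in full; the proofs are below) =====
def Claim_unchanged_minimum_days : Prop := ∀ (n : Int) (k : Int) (a : List Int), Dom_minimum_days n k a → Pre_minimum_days n k a → Spec_minimum_days n k a (minimum_days n k a)
def Claim_changed_minimum_days : Prop := Dom_minimum_days (pvDiffWitness_minimum_days.1) (pvDiffWitness_minimum_days.2.1) (pvDiffWitness_minimum_days.2.2) ∧ Pre_minimum_days (pvDiffWitness_minimum_days.1) (pvDiffWitness_minimum_days.2.1) (pvDiffWitness_minimum_days.2.2) ∧ D_minimum_days (pvDiffWitness_minimum_days.1) (pvDiffWitness_minimum_days.2.1) (pvDiffWitness_minimum_days.2.2) ∧ minimum_days (pvDiffWitness_minimum_days.1) (pvDiffWitness_minimum_days.2.1) (pvDiffWitness_minimum_days.2.2) = pvDiffWitnessOut_minimum_days.1 ∧ minimum_days_alt (pvDiffWitness_minimum_days.1) (pvDiffWitness_minimum_days.2.1) (pvDiffWitness_minimum_days.2.2) = pvDiffWitnessOut_minimum_days.2 ∧ pvDiffWitnessOut_minimum_days.1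 ≠ pvDiffWitnessOut_minimum_days.2
def Claim_exact_minimum_days : Prop := ∀ (n : Int) (k : Int) (a : List Int), Dom_minimum_days n k a → Pre_minimum_days n k a → D_minimum_days n k a → minimum_days n k a ≠ minimum_days_alt n k a

-- ===== LEMMAS AND PROOFS =====

-- the loop invariant relating A's set of seen values to B's top-two pair
def pvInv (s : List Int) (hi lo : Option Int) : Prop :=
  match hi, lo with
  | none, none => s = []
  | some h, none => s ≠ [] ∧ ∀ y ∈ s, y = h
  | some h, some l =>
      h ∈ s ∧ l ∈ s ∧ l < h ∧ (∀ y ∈ s, y ≤ h) ∧ (∀ y ∈ s, y ≠ h → y ≤ l)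
  | none, some _ => False

lemma pvTop2_inv (s : List Int) (hnd : s.Nodup) (hi lo : Option Int)
    (hinv : pvInv s hi lo) (x : Int) :
    (PySem.Set.add s x).Nodup ∧
      pvInv (PySem.Set.add s x) (pvTop2 hi lo x).1 (pvTop2 hi lo x).2 := by
  match hi, lo with
  | none, some l => exact absurd hinv (by simp [pvInv])
  | none, none =>
    have hs : s = [] := hinv
    subst hs
    have hadd : PySem.Set.add ([] : List Int) x = [x] := PySem.Set.add_of_not_mem (by simp)
    rw [hadd]
    exact ⟨List.nodup_singleton x, ⟨by simp, by simp⟩⟩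
  | some h, none =>
    obtain ⟨hne, hall⟩ : s ≠ [] ∧ ∀ y ∈ s, y = h := hinv
    have hs : s = [h] := by
      cases s with
      | nil => exact absurd rfl hne
      | cons w ws =>
        have hw := hall w (by simp)
        subst hw
        cases ws with
        | nil => rfl
        | cons u us =>
          have hu := hall u (by simp)
          simp [hu] at hnd
    subst hs
    by_cases hxh : x = h
    · subst hxh
      rw [PySem.Set.add_of_mem (by simp)]
      have hpair : pvTop2 (some x) none x = (some x, none) := by simp [pvTop2]
      rw [hpair]
      exact ⟨hnd, ⟨by simp, by simp⟩⟩
    · rw [PySem.Set.add_of_not_mem (by simp [hxh])]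
      by_cases hhx : h < x
      · have hpair : pvTop2 (some h) none x = (some x, some h) := by
          simp [pvTop2, hxh, hhx]
        rw [hpair]
        refine ⟨by simp; omega, ?_⟩
        show x ∈ [h, x] ∧ h ∈ [h, x] ∧ h < x ∧ (∀ y ∈ [h, x], y ≤ x) ∧
          (∀ y ∈ [h, x], y ≠ x → y ≤ h)
        refine ⟨by simp, by simp, hhx, ?_, ?_⟩
        · intro y hy; simp at hy; omega
        · intro y hy hne; simp at hy; omega
      · have hpair : pvTop2 (some h) none x = (some h, some x) := by
          simp [pvTop2, hxh, hhx]
        rw [hpair]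
        refine ⟨by simp; omega, ?_⟩
        show h ∈ [h, x] ∧ x ∈ [h, x] ∧ x < h ∧ (∀ y ∈ [h, x], y ≤ h) ∧
          (∀ y ∈ [h, x], y ≠ h → y ≤ x)
        have hxlt : x < h := by omega
        refine ⟨by simp, by simp, hxlt, ?_, ?_⟩
        · intro y hy; simp at hy; omega
        · intro y hy hne; simp at hy; omega
  | some h, some l =>
    obtain ⟨hhm, hlm, hlh, hmax, hsec⟩ :
        h ∈ s ∧ l ∈ s ∧ l < h ∧ (∀ y ∈ s, y ≤ h) ∧ (∀ y ∈ s, y ≠ h → y ≤ l) := hinv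
    by_cases hxh : x = h
    · subst hxh
      rw [PySem.Set.add_of_mem hhm]
      have hpair : pvTop2 (some x) (some l) x = (some x, some l) := by simp [pvTop2]
      rw [hpair]
      exact ⟨hnd, ⟨hhm, hlm, hlh, hmax, hsec⟩⟩
    · by_cases hhx : h < x
      · have hxm : x ∉ s := fun hm => absurd (hmax x hm) (by omega)
        rw [PySem.Set.add_of_not_mem hxm]
        have hpair : pvTop2 (some h) (some l) x = (some x, some h) := by
          simp [pvTop2, hxh, hhx]
        rw [hpair]
        refine ⟨hnd.append (List.nodup_singleton x) (by simp [List.disjoint_singleton]; exact hxm), ?_⟩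
        show x ∈ s ++ [x] ∧ h ∈ s ++ [x] ∧ h < x ∧ (∀ y ∈ s ++ [x], y ≤ x) ∧
          (∀ y ∈ s ++ [x], y ≠ x → y ≤ h)
        refine ⟨by simp, by simp [hhm], hhx, ?_, ?_⟩
        · intro y hy
          rcases List.mem_append.mp hy with hy | hy
          · have := hmax y hy; omega
          · simp at hy; omega
        · intro y hy hne
          rcases List.mem_append.mp hy with hy | hy
          · exact hmax y hy
          · simp at hy; omega
      · have hxlt : x < h := by omega
        by_cases hlx : l < x
        · have hxm : x ∉ s := fun hm => absurd (hsec x hm hxh) (by omega)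
          rw [PySem.Set.add_of_not_mem hxm]
          have hpair : pvTop2 (some h) (some l) x = (some h, some x) := by
            simp [pvTop2, hxh, hhx, hlx]
          rw [hpair]
          refine ⟨hnd.append (List.nodup_singleton x) (by simp [List.disjoint_singleton]; exact hxm), ?_⟩
          show h ∈ s ++ [x] ∧ x ∈ s ++ [x] ∧ x < h ∧ (∀ y ∈ s ++ [x], y ≤ h) ∧
            (∀ y ∈ s ++ [x], y ≠ h → y ≤ x)
          refine ⟨by simp [hhm], by simp, hxlt, ?_, ?_⟩
          · intro y hy
            rcases List.mem_append.mp hy with hy | hy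
            · exact hmax y hy
            · simp at hy; omega
          · intro y hy hne
            rcases List.mem_append.mp hy with hy | hy
            · have := hsec y hy hne; omega
            · simp at hy; omega
        · have hpair : pvTop2 (some h) (some l) x = (some h, some l) := by
            simp [pvTop2, hxh, hhx, hlx]
          rw [hpair]
          rw [PySem.Set.add_eq_ite]
          split_ifs with hmem
          · exact ⟨hnd, ⟨hhm, hlm, hlh, hmax, hsec⟩⟩
          · refine ⟨hnd.append (List.nodup_singleton x) (by simp [List.disjoint_singleton]; exact hmem), ?_⟩
            show h ∈ s ++ [x] ∧ l ∈ s ++ [x] ∧ l < h ∧ (∀ y ∈ s ++ [x], y ≤ h) ∧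
              (∀ y ∈ s ++ [x], y ≠ h → y ≤ l)
            refine ⟨by simp [hhm], by simp [hlm], hlh, ?_, ?_⟩
            · intro y hy
              rcases List.mem_append.mp hy with hy | hy
              · exact hmax y hy
              · simp at hy; omega
            · intro y hy hne
              rcases List.mem_append.mp hy with hy | hy
              · exact hsec y hy hne
              · simp at hy; omega

lemma pv_top_two (L : List Int) (hp : L.Pairwise (· < ·)) (h l : Int)
    (hh : h ∈ L) (hl : l ∈ L) (hlh : l < h)
    (hmax : ∀ y ∈ L, y ≤ h) (hsec : ∀ y ∈ L, y ≠ h → y ≤ l) :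
    ∃ pre, L = pre ++ [l, h] := by
  induction L with
  | nil => cases hh
  | cons z rest ih =>
    rcases List.pairwise_cons.mp hp with ⟨hz, hp'⟩
    by_cases hzh : z = h
    · subst hzh
      have hre : rest = [] := by
        cases rest with
        | nil => rfl
        | cons w ws =>
          have h1 := hz w (by simp)
          have h2 := hmax w (by simp)
          omega
      subst hre
      simp at hl; omega
    · by_cases hzl : z = l
      · subst hzl
        have hhr : h ∈ rest := by
          rcases List.mem_cons.mp hh with h1 | h1
          · omega
          · exact h1
        have hall : ∀ y ∈ rest, y = h := by
          intro y hy
          have h1 := hz y hy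
          have h2 := hsec y (List.mem_cons_of_mem _ hy)
          by_contra hne
          exact absurd (h2 hne) (by omega)
        have hre : rest = [h] := by
          cases rest with
          | nil => cases hhr
          | cons w ws =>
            have hw := hall w (by simp)
            subst hw
            cases ws with
            | nil => rfl
            | cons u us =>
              have hu := hall u (by simp)
              have := (List.pairwise_cons.mp hp').1 u (by simp)
              omega
        exact ⟨[], by simp [hre]⟩
      · have hhr : h ∈ rest := by
          rcases List.mem_cons.mp hh with h1 | h1
          · omega
          · exact h1
        have hlr : l ∈ rest := by
          rcases List.mem_cons.mp hl with h1 | h1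
          · omega
          · exact h1
        obtain ⟨pre, hpre⟩ := ih hp' hhr hlr
          (fun y hy => hmax y (List.mem_cons_of_mem _ hy))
          (fun y hy hne => hsec y (List.mem_cons_of_mem _ hy) hne)
        exact ⟨z :: pre, by simp [hpre]⟩

-- a nodup list satisfying the (h, none) invariant is the singleton [h]
lemma pv_singleton (s : List Int) (hnd : s.Nodup) (h : Int)
    (hne : s ≠ []) (hall : ∀ y ∈ s, y = h) : s = [h] := by
  cases s with
  | nil => exact absurd rfl hne
  | cons w ws =>
    have hw := hall w (by simp)
    subst hw
    cases ws with
    | nil => rfl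
    | cons u us =>
      have hu := hall u (by simp)
      simp [hu] at hnd

lemma pv_sorted_shape (s : List Int) (hnd : s.Nodup) (h l : Int)
    (hinv : pvInv s (some h) (some l)) :
    ∃ pre, PySem.List.sorted s (fun x => x) false = pre ++ [l, h] := by
  obtain ⟨hhm, hlm, hlh, hmax, hsec⟩ :
      h ∈ s ∧ l ∈ s ∧ l < h ∧ (∀ y ∈ s, y ≤ h) ∧ (∀ y ∈ s, y ≠ h → y ≤ l) := hinv
  have hperm := PySem.List.sorted_perm s (fun x : Int => x) false
  have hpnd : (PySem.List.sorted s (fun x : Int => x) false).Nodup := hperm.nodup_iff.mpr hnd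
  have hple := PySem.List.sorted_pairwise s (fun x : Int => x)
  have hplt : (PySem.List.sorted s (fun x : Int => x) false).Pairwise (· < ·) :=
    (hple.and hpnd).imp (fun {a b} ⟨u, v⟩ => lt_of_le_of_ne u v)
  exact pv_top_two _ hplt h l
    ((PySem.List.mem_sorted _ _ _ _).mpr hhm) ((PySem.List.mem_sorted _ _ _ _).mpr hlm) hlh
    (fun y hy => hmax y ((PySem.List.mem_sorted _ _ _ _).mp hy))
    (fun y hy => hsec y ((PySem.List.mem_sorted _ _ _ _).mp hy))

lemma pv_go_eq (k : Int) (hk : k ≠ -1) (a : List Int) (idxs : List Int) :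
    ∀ (s : PySem.Set Int) (hi lo : Option Int), s.Nodup → pvInv s hi lo →
      pvAgo k a s idxs = pvBgo k a hi lo idxs := by
  induction idxs with
  | nil => intro s hi lo _ _; rfl
  | cons i is ih =>
    intro s hi lo hnd hinv
    obtain ⟨hnd', hinv'⟩ := pvTop2_inv s hnd hi lo hinv (PySem.List.pyGetD a i 0)
    have hmem : PySem.List.pyGetD a i 0 ∈ PySem.Set.add s (PySem.List.pyGetD a i 0) :=
      (PySem.Set.mem_add _ _ _).mpr (Or.inr rfl)
    have hne' : PySem.Set.add s (PySem.List.pyGetD a i 0) ≠ [] := by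
      intro h0; rw [h0] at hmem; cases hmem
    -- case on the shape of the updated pair
    cases hp2 : (pvTop2 hi lo (PySem.List.pyGetD a i 0)).2 with
    | none =>
      cases hp1 : (pvTop2 hi lo (PySem.List.pyGetD a i 0)).1 with
      | none =>
        rw [hp1, hp2] at hinv'
        exact absurd (hinv' : _ = ([] : List Int)) hne'
      | some h =>
        have hinv2 : pvInv (PySem.Set.add s (PySem.List.pyGetD a i 0)) (some h) none := by
          rw [← hp1, ← hp2]; exact hinv'
        obtain ⟨hne, hall⟩ : _ ≠ ([] : List Int) ∧ _ := hinv2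
        have hsing := pv_singleton _ hnd' h hne hall
        have hsrt : PySem.List.sorted (PySem.Set.add s (PySem.List.pyGetD a i 0)) (fun x => x) false = [h] := by
          rw [hsing]; exact PySem.List.sorted_eq_self_of_pairwise _ _ (List.pairwise_singleton _ _)
        have hA : pvAgo k a s (i :: is) = pvAgo k a (PySem.Set.add s (PySem.List.pyGetD a i 0)) is := by
          simp only [pvAgo, hsing]
          simp [PySem.Set.len]
          omega
        have hB : pvBgo k a hi lo (i :: is) =
            pvBgo k a (pvTop2 hi lo (PySem.List.pyGetD a i 0)).1 (pvTop2 hi lo (PySem.List.pyGetD a i 0)).2 is := by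
          simp only [pvBgo, hp2]
        rw [hA, hB]
        exact ih _ _ _ hnd' hinv'
    | some l =>
      cases hp1 : (pvTop2 hi lo (PySem.List.pyGetD a i 0)).1 with
      | none => rw [hp1, hp2] at hinv'; exact absurd hinv' (by simp [pvInv])
      | some h =>
        have hinv2 : pvInv (PySem.Set.add s (PySem.List.pyGetD a i 0)) (some h) (some l) := by
          rw [← hp1, ← hp2]; exact hinv'
        obtain ⟨pre, hsrt⟩ := pv_sorted_shape _ hnd' h l hinv2
        have hlen : (PySem.Set.add s (PySem.List.pyGetD a i 0)).length = pre.length + 2 := by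
          have := (PySem.List.sorted_perm (PySem.Set.add s (PySem.List.pyGetD a i 0)) (fun x : Int => x) false).length_eq
          rw [hsrt] at this; simp at this; omega
        have hget1 : PySem.List.pyGetD (PySem.List.sorted (PySem.Set.add s (PySem.List.pyGetD a i 0)) (fun x => x) false) (-1) 0 = h := by
          rw [hsrt]
          have : pre ++ [l, h] = (pre ++ [l]) ++ [h] := by simp
          rw [this, PySem.List.pyGetD_neg_one_append_singleton]
        have hget2 : PySem.List.pyGetD (PySem.List.sorted (PySem.Set.add s (PySem.List.pyGetD a i 0)) (fun x => x) false) (-2) 0 = l := by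
          rw [hsrt, PySem.List.pyGetD_neg_ofNat (pre ++ [l, h]) 2 0 (by omega) (by simp)]
          simp
        have hA : pvAgo k a s (i :: is) =
            (if h - l - 1 = k then i + 1 else pvAgo k a (PySem.Set.add s (PySem.List.pyGetD a i 0)) is) := by
          have hlt : (1 : Int) < PySem.Set.len (PySem.Set.add s (PySem.List.pyGetD a i 0)) := by
            simp only [PySem.Set.len, hlen]; omega
          simp only [pvAgo, hget1, hget2, if_pos hlt]
          by_cases hc : h - l - 1 = k
          · rw [if_pos hc, if_pos hc]
          · rw [if_neg hc, if_neg hc]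
            show (match (if _ ≠ ([] : List Int) then some _ else none : Option Int) with
              | some le => if le - h - 1 = k then i + 1 else pvAgo k a (PySem.Set.add s (PySem.List.pyGetD a i 0)) is
              | none => pvAgo k a (PySem.Set.add s (PySem.List.pyGetD a i 0)) is) = _
            rw [if_pos hne']
            show (if h - h - 1 = k then i + 1 else pvAgo k a (PySem.Set.add s (PySem.List.pyGetD a i 0)) is) = _
            rw [if_neg (by omega : ¬(h - h - 1 = k))]
        have hB : pvBgo k a hi lo (i :: is) =
            (if h - l - 1 = k then i + 1
             else pvBgo k a (pvTop2 hi lo (PySem.List.pyGetD a i 0)).1 (pvTop2 hi lo (PySem.List.pyGetD a i 0)).2 is) := by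
          simp only [pvBgo, hp2, hp1]
          rfl
        rw [hA, hB]
        split
        · rfl
        · exact ih _ _ _ hnd' hinv'

lemma pvTop2_ok (hi lo : Option Int) (x : Int)
    (hok : ∀ h l, hi = some h → lo = some l → l < h) (hsh : hi = none → lo = none) :
    (∀ h l, (pvTop2 hi lo x).1 = some h → (pvTop2 hi lo x).2 = some l → l < h) ∧
      ((pvTop2 hi lo x).1 = none → (pvTop2 hi lo x).2 = none) := by
  cases hi with
  | none =>
    have := hsh rfl
    subst this
    refine ⟨?_, by simp [pvTop2]⟩
    intro h l h1 h2
    simp [pvTop2] at h2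
  | some h0 =>
    by_cases hxh : x = h0
    · refine ⟨?_, by simp [pvTop2, hxh]⟩
      intro h l h1 h2
      simp [pvTop2, hxh] at h1 h2
      subst h1
      exact hok h0 l rfl (by rw [h2])
    · by_cases hhx : h0 < x
      · refine ⟨?_, by simp [pvTop2, hxh, hhx]⟩
        intro h l h1 h2
        simp [pvTop2, hxh, hhx] at h1 h2
        omega
      · cases lo with
        | none =>
          refine ⟨?_, by simp [pvTop2, hxh, hhx]⟩
          intro h l h1 h2
          simp [pvTop2, hxh, hhx] at h1 h2
          omega
        | some l0 =>
          by_cases hlx : l0 < x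
          · refine ⟨?_, by simp [pvTop2, hxh, hhx, hlx]⟩
            intro h l h1 h2
            simp [pvTop2, hxh, hhx, hlx] at h1 h2
            omega
          · refine ⟨?_, by simp [pvTop2, hxh, hhx, hlx]⟩
            intro h l h1 h2
            simp [pvTop2, hxh, hhx, hlx] at h1 h2
            have := hok h0 l0 rfl rfl
            omega

lemma pvB_no_hit (a : List Int) (idxs : List Int) :
    ∀ hi lo, (∀ h l, hi = some h → lo = some l → l < h) → (hi = none → lo = none) →
      pvBgo (-1) a hi lo idxs = -1 := by
  induction idxs with
  | nil => intro hi lo _ _; rfl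
  | cons i is ih =>
    intro hi lo hok hsh
    obtain ⟨hok', hsh'⟩ := pvTop2_ok hi lo (PySem.List.pyGetD a i 0) hok hsh
    simp only [pvBgo]
    cases hp2 : (pvTop2 hi lo (PySem.List.pyGetD a i 0)).2 with
    | none => exact ih _ _ (fun h l _ h2 => by cases h2) (fun _ => rfl)
    | some l =>
      cases hp1 : (pvTop2 hi lo (PySem.List.pyGetD a i 0)).1 with
      | none => exact absurd (hsh' hp1) (by rw [hp2]; simp)
      | some h =>
        have hlt := hok' h l hp1 hp2
        show (if (some h).getD 0 - l - 1 = -1 then i + 1 else pvBgo (-1) a (some h) (some l) is) = -1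
        rw [show ((some h).getD 0 : Int) = h from rfl]
        rw [if_neg (by omega)]
        exact ih (some h) (some l) (fun h' l' e1 e2 => by cases e1; cases e2; exact hlt)
          (fun e => by cases e)

-- A's first iteration for k = -1 returns 1
lemma pvA_neg_one (a : List Int) (i : Int) (is : List Int) :
    pvAgo (-1) a PySem.Set.empty (i :: is) = i + 1 := by
  have e1 : PySem.Set.add (PySem.Set.empty : PySem.Set Int) (PySem.List.pyGetD a i 0) =
      [PySem.List.pyGetD a i 0] := PySem.Set.add_of_not_mem (by simp [PySem.Set.empty])
  have e2 : PySem.List.sorted [PySem.List.pyGetD a i 0] (fun x => x) false =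
      [PySem.List.pyGetD a i 0] :=
    PySem.List.sorted_eq_self_of_pairwise _ _ (List.pairwise_singleton _ _)
  have e3 : PySem.List.pyGetD [PySem.List.pyGetD a i 0] (-1) 0 = PySem.List.pyGetD a i 0 := by
    simpa using PySem.List.pyGetD_neg_one_append_singleton (xs := ([] : List Int))
      (x := PySem.List.pyGetD a i 0) (d := 0)
  simp only [pvAgo, e1, e2, e3]
  rw [if_neg (by simp [PySem.Set.len])]
  rw [if_pos (by simp)]
  show (if PySem.List.pyGetD a i 0 - PySem.List.pyGetD a i 0 - 1 = -1 then i + 1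
    else pvAgo (-1) a [PySem.List.pyGetD a i 0] is) = i + 1
  rw [if_pos (by omega)]

-- ===== VERDICT (by name: the statement is the Claim_ definition above) =====
theorem minimum_days_spec : Claim_unchanged_minimum_days := by
  intro n k a _hdom _hpre hnd
  by_cases hk : k = -1
  · have hn : n < 1 := by
      by_contra hcon
      exact hnd ⟨hk, by omega⟩
    show minimum_days n k a = minimum_days_alt n k a
    unfold minimum_days minimum_days_alt
    rw [PySem.List.pyRange_one_eq_nil (by omega)]
    rfl
  · exact pv_go_eq k hk a (PySem.List.pyRange 0 n 1) PySem.Set.empty none none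
      List.nodup_nil rfl

theorem minimum_days_changed : Claim_changed_minimum_days := by
  unfold Claim_changed_minimum_days; decide

theorem minimum_days_tight : Claim_exact_minimum_days := by
  intro n k a _hdom _hpre hd
  obtain ⟨hk, hn⟩ := hd
  subst hk
  have hA : minimum_days n (-1) a = 1 := by
    unfold minimum_days
    rw [PySem.List.pyRange_one_cons (by omega : (0 : Int) < n)]
    rw [pvA_neg_one]
    omega
  have hB : minimum_days_alt n (-1) a = -1 := by
    unfold minimum_days_alt
    exact pvB_no_hit a _ none none (fun h l h1 _ => by cases h1) (fun _ => rfl)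
  rw [hA, hB]
  decide
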